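-- pv_equiv track=rewrite | github.com/Unbearabl3/Project | project.py | grade_exam
-- ===== SOURCE A (Python) =====
-- def grade_exam(correct_answers, student_answers):
--     total_correct = 0
--     incorrect_questions = []
--
--     for i in range(len(correct_answers)):
--         if student_answers[i] == correct_answers[i]:
--             total_correct += 1
--         else:
--             incorrect_questions.append(i + 1)  # Question numbers are 1-based
--
--     return total_correct, incorrect_questions
-- ===== SOURCE B (Python) =====
-- def grade_exam(correct_answers, student_answers):
--     # Divide and conquer over the index range [lo, hi): grade each half
--     # independently and merge (counts add, incorrect lists concatenate).
--     def solve(lo, hi):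
--         if hi == lo:
--             return 0, []
--         if hi == lo + 1:
--             if student_answers[lo] == correct_answers[lo]:
--                 return 1, []
--             return 0, [lo + 1]
--         mid = (lo + hi) // 2
--         cl, wl = solve(lo, mid)
--         cr, wr = solve(mid, hi)
--         return cl + cr, wl + wr
--     return solve(0, len(correct_answers))
-- ===== Notes on version B (the rewrite author's own statement) =====
-- stated objective: alternative
-- what changed: Replaces A's single linear accumulator loop by a divide-and-conquer recursion over the index range: each half is graded independently and the (count, incorrect-list) results are merged by addition and concatenation.
import Mathlib
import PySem

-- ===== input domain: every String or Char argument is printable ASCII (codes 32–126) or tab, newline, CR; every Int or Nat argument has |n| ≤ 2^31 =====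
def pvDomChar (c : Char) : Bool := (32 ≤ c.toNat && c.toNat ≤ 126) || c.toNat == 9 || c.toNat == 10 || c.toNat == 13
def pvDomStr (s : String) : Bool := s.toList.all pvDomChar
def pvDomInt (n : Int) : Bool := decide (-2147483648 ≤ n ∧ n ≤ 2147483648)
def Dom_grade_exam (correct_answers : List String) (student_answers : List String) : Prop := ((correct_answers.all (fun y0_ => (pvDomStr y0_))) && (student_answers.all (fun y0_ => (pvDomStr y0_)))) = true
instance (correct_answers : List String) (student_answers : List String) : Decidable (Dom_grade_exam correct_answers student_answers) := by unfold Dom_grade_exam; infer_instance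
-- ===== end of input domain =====

-- B grades by divide-and-conquer on the index range (halves merged by adding counts
-- and concatenating incorrect lists) instead of A's linear accumulator loop
-- (objective: alternative decomposition, same result).


-- ===== PORT A =====
-- A's loop over range(len(correct_answers)) with a branching accumulator
-- (count, incorrect list); indexing via getD is exact under Pre_ (all indices in range).
def grade_exam (correct_answers : List String) (student_answers : List String) : Int × List Int :=
  (List.range correct_answers.length).foldl
    (fun (st : Int × List Int) i =>
      if student_answers.getD i "" = correct_answers.getD i ""
      then (st.1 + 1, st.2)
      else (st.1, st.2 ++ [(Int.ofNat i) + 1]))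
    (0, [])

-- ===== PORT B =====
-- B's inner solve(lo, hi): divide and conquer over the index range.
-- `fuel` only makes the recursion structural (any fuel ≥ hi - lo computes solve(lo, hi)).
def gradeSolve (correct_answers student_answers : List String) : Nat → Nat → Nat → Int × List Int
  | 0, _, _ => (0, [])
  | Nat.succ n, lo, hi =>
    if hi ≤ lo then (0, [])  -- Python's `hi == lo` guard; ≤ keeps the function total (solve only ever reaches hi = lo here)
    else if hi = lo + 1 then
      if student_answers.getD lo "" = correct_answers.getD lo "" then (1, [])
      else (0, [(Int.ofNat lo) + 1])
    else
      ((gradeSolve correct_answers student_answers n lo ((lo + hi) / 2)).1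
         + (gradeSolve correct_answers student_answers n ((lo + hi) / 2) hi).1,
       (gradeSolve correct_answers student_answers n lo ((lo + hi) / 2)).2
         ++ (gradeSolve correct_answers student_answers n ((lo + hi) / 2) hi).2)

def grade_exam_alt (correct_answers : List String) (student_answers : List String) : Int × List Int :=
  gradeSolve correct_answers student_answers correct_answers.length 0 correct_answers.length

-- ===== PRECONDITION & SPEC =====
-- A raises IndexError when student_answers is shorter than correct_answers; Pre_ excludes exactly that.
def Pre_grade_exam (correct_answers : List String) (student_answers : List String) : Prop :=
  correct_answers.length ≤ student_answers.length
instance (correct_answers : List String) (student_answers : List String) : Decidable (Pre_grade_exam correct_answers student_answers) := by unfold Pre_grade_exam; infer_instance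
def pvWitness_grade_exam : List String × List String := (["a", "b"], ["a", "c"])

def Spec_grade_exam (correct_answers : List String) (student_answers : List String) (out : Int × List Int) : Prop := out = grade_exam_alt correct_answers student_answers
instance (correct_answers : List String) (student_answers : List String) (out : Int × List Int) : Decidable (Spec_grade_exam correct_answers student_answers out) := by unfold Spec_grade_exam; infer_instance

-- ===== CLAIM (what is proved, stated in full; the proofs are below) =====
def Claim_equal_grade_exam : Prop := ∀ (correct_answers : List String) (student_answers : List String), Dom_grade_exam correct_answers student_answers → Pre_grade_exam correct_answers student_answers → Spec_grade_exam correct_answers student_answers (grade_exam correct_answers student_answers)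

-- ===== LEMMAS AND PROOFS =====

-- The common characterisation both programs compute on the index range [lo, hi):
def gradeRef (ca sa : List String) (lo hi : Nat) : Int × List Int :=
  ((((List.range' lo (hi - lo)).filter (fun i => sa.getD i "" = ca.getD i "")).length : Int),
   ((List.range' lo (hi - lo)).filter (fun i => sa.getD i "" ≠ ca.getD i "")).map
     (fun i => (Int.ofNat i) + 1))

-- A's fold over any index list, from any start state, equals the reference decomposition.
theorem grade_fold_eq (ca sa : List String) (L : List Nat) (c : Int) (l : List Int) :
    L.foldl
      (fun (st : Int × List Int) i =>
        if sa.getD i "" = ca.getD i ""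
        then (st.1 + 1, st.2)
        else (st.1, st.2 ++ [(Int.ofNat i) + 1]))
      (c, l)
    = (c + ((L.filter (fun i => sa.getD i "" = ca.getD i "")).length : Int),
       l ++ (L.filter (fun i => sa.getD i "" ≠ ca.getD i "")).map (fun i => (Int.ofNat i) + 1)) := by
  induction L generalizing c l with
  | nil => simp
  | cons x xs ih =>
    by_cases h : sa.getD x "" = ca.getD x ""
    · rw [List.foldl_cons, if_pos h, ih,
          List.filter_cons_of_pos (by simpa using h),
          List.filter_cons_of_neg (by simpa using h)]
      simp [add_comm, add_assoc]
    · rw [List.foldl_cons, if_neg h, ih,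
          List.filter_cons_of_neg (by simpa using h),
          List.filter_cons_of_pos (by simpa using h)]
      simp

-- B's divide-and-conquer equals the reference decomposition, for any sufficient fuel.
theorem gradeSolve_eq_ref (ca sa : List String) (n lo hi : Nat) (hn : hi - lo ≤ n) :
    gradeSolve ca sa n lo hi = gradeRef ca sa lo hi := by
  induction n generalizing lo hi with
  | zero =>
    have h0 : hi - lo = 0 := by omega
    simp [gradeSolve, gradeRef, h0]
  | succ n ih =>
    unfold gradeSolve gradeRef
    by_cases h0 : hi ≤ lo
    · have : hi - lo = 0 := by omega
      simp [h0, this]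
    · rw [if_neg h0]
      by_cases h1 : hi = lo + 1
      · have h2 : hi - lo = 1 := by omega
        rw [if_pos h1, h2]
        by_cases h : sa[lo]?.getD "" = ca[lo]?.getD "" <;>
          simp [List.range', List.getD, h]
      · rw [if_neg h1]
        rw [ih _ _ (by omega), ih _ _ (by omega)]
        unfold gradeRef
        have hsplit : List.range' lo (hi - lo)
            = List.range' lo ((lo + hi) / 2 - lo) ++ List.range' ((lo + hi) / 2) (hi - (lo + hi) / 2) := by
          have h2 : lo + ((lo + hi) / 2 - lo) = (lo + hi) / 2 := by omega
          have h3 : hi - lo = ((lo + hi) / 2 - lo) + (hi - (lo + hi) / 2) := by omega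
          rw [h3, ← List.range'_append_1, h2]
        rw [hsplit]
        simp [List.filter_append]

theorem grade_exam_spec : Claim_equal_grade_exam := by
  intro ca sa _ _
  unfold Spec_grade_exam grade_exam grade_exam_alt
  rw [gradeSolve_eq_ref _ _ _ _ _ (by omega), grade_fold_eq]
  unfold gradeRef
  have : List.range' 0 (ca.length - 0) = List.range ca.length := by
    simp [List.range_eq_range']
  rw [this]
  simp
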